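-- pv_equiv track=rewrite | github.com/lelilia/advent_of_code_2015 | day11.py | get_next_option
-- ===== SOURCE A (Python) =====
-- def get_next_option(s):
--     s = list(s)
--     i = len(s) - 1
--     while i >= 0:
--         if s[i] != "z":
--             s[i] = chr(ord(s[i]) + 1)
--             break
--         if s[i] == "z":
--             s[i] = "a"
--         i -= 1
--     return "".join(s)
-- ===== SOURCE B (Python) =====
-- def get_next_option(s):
--     if not s:
--         return s
--     last = s[-1]
--     if last != "z":
--         return s[:-1] + chr(ord(last) + 1)
--     return get_next_option(s[:-1]) + "a"
-- ===== Notes on version B (the rewrite author's own statement) =====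
-- stated objective: simpler
-- what changed: Replaces the backward index loop with in-place list mutation by a recursion on the string prefix: bump the last character if it is not 'z', otherwise recurse on the prefix and append 'a'.
import Mathlib
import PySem

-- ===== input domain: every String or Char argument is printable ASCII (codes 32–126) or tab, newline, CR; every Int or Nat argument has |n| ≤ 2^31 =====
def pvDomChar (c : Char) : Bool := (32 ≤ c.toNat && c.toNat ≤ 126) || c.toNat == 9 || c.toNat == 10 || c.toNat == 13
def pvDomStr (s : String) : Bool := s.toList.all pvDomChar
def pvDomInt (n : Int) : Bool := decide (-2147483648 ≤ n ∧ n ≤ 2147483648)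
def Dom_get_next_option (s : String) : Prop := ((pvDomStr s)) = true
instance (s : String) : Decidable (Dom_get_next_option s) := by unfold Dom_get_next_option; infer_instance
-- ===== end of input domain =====

-- B replaces A's backward index loop over a mutable char list with a recursion on the
-- string prefix (simpler decomposition); equivalence proved on all inputs.


-- ===== PORT A =====
-- the 'while i >= 0' loop over the mutable char list; 'break' = returning without recursing
def pvANextLoop (s : List Char) (i : Int) : List Char :=
  if h : 0 ≤ i then
    match PySem.List.pyGet? s i with
    | none => s   -- unreachable: 0 ≤ i < len s at every call
    | some c =>
      if c ≠ 'z' then s.set i.toNat (Char.ofNat (c.toNat + 1))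
      else pvANextLoop (s.set i.toNat 'a') (i - 1)
  else s
termination_by (i + 1).toNat
decreasing_by omega

def get_next_option (s : String) : String :=
  String.mk (pvANextLoop s.toList ((s.toList.length : Int) - 1))

-- ===== PORT B =====
-- recursion on the prefix: last char ≠ 'z' → bump it; otherwise recurse on s[:-1], append 'a'
def pvBNext (l : List Char) : List Char :=
  if h : l = [] then []
  else
    if l.getLast h ≠ 'z' then l.dropLast ++ [Char.ofNat ((l.getLast h).toNat + 1)]
    else pvBNext l.dropLast ++ ['a']
termination_by l.length
decreasing_by
  have hne : l.length ≠ 0 := by simpa [List.length_eq_zero_iff] using h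
  simp [List.length_dropLast]
  omega

def get_next_option_alt (s : String) : String := String.mk (pvBNext s.toList)

-- ===== PRECONDITION & SPEC =====
def Spec_get_next_option (s : String) (out : String) : Prop := out = get_next_option_alt s
instance (s : String) (out : String) : Decidable (Spec_get_next_option s out) := by unfold Spec_get_next_option; infer_instance

-- ===== CLAIM (what is proved, stated in full; the proofs are below) =====
def Claim_equal_get_next_option : Prop := ∀ (s : String), Dom_get_next_option s → Spec_get_next_option s (get_next_option s)

-- ===== LEMMAS AND PROOFS =====

lemma pvANextLoop_neg (l : List Char) (i : Int) (h : i < 0) : pvANextLoop l i = l := by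
  rw [pvANextLoop, dif_neg (by omega)]

lemma pvANextLoop_step (l : List Char) (n : Nat) (h : n < l.length) :
    pvANextLoop l (n : Int) =
      if l[n] ≠ 'z' then l.set n (Char.ofNat (l[n].toNat + 1))
      else pvANextLoop (l.set n 'a') ((n : Int) - 1) := by
  rw [pvANextLoop, dif_pos (by omega),
      PySem.List.pyGet?_eq_some_getElem _ (by omega) (by exact_mod_cast h)]
  simp

-- A's loop never touches indices > i, so a fixed suffix passes through unchanged
lemma pvANextLoop_append (l t : List Char) (i : Int) (hi : i < (l.length : Int)) :
    pvANextLoop (l ++ t) i = pvANextLoop l i ++ t := by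
  by_cases h0 : 0 ≤ i
  · obtain ⟨n, hn⟩ : ∃ n : Nat, i = (n : Int) := ⟨i.toNat, by omega⟩
    subst hn
    induction n generalizing l t with
    | zero =>
      have hlt : 0 < l.length := by exact_mod_cast hi
      rw [pvANextLoop_step (l ++ t) 0 (by simp; omega), pvANextLoop_step l 0 hlt,
          List.getElem_append_left hlt]
      split
      · rw [List.set_append_left _ _ hlt]
      · rw [List.set_append_left _ _ hlt,
            pvANextLoop_neg _ _ (by omega), pvANextLoop_neg _ _ (by omega)]
    | succ n ih =>
      have hlt : n + 1 < l.length := by exact_mod_cast hi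
      rw [pvANextLoop_step (l ++ t) (n + 1) (by simp; omega),
          pvANextLoop_step l (n + 1) hlt, List.getElem_append_left hlt]
      split
      · rw [List.set_append_left _ _ hlt]
      · rw [List.set_append_left _ _ hlt]
        have hc : (((n + 1 : Nat)) : Int) - 1 = (n : Int) := by push_cast; ring
        rw [hc]
        exact ih (l.set (n + 1) 'a') t (by simp; omega) (by omega)
  · rw [pvANextLoop_neg _ _ (by omega), pvANextLoop_neg _ _ (by omega)]

lemma pvANextLoop_eq_pvBNext (l : List Char) :
    pvANextLoop l ((l.length : Int) - 1) = pvBNext l := by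
  induction l using List.reverseRecOn with
  | nil =>
    rw [pvBNext, pvANextLoop]
    simp
  | append_singleton xs x ih =>
    have hne : xs ++ [x] ≠ [] := by simp
    rw [pvBNext, dif_neg hne]
    have hlast : (xs ++ [x]).getLast hne = x := List.getLast_concat
    have hlen : ((xs ++ [x]).length : Int) - 1 = ((xs.length : Nat) : Int) := by simp
    rw [hlen, pvANextLoop_step (xs ++ [x]) xs.length (by simp)]
    have hget : (xs ++ [x])[xs.length]'(by simp) = x := by
      simp
    have hsetz : (xs ++ [x]).set xs.length 'a' = xs ++ ['a'] := by
      rw [List.set_append_right _ _ (le_refl _)]; simp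
    have hsetb : (xs ++ [x]).set xs.length (Char.ofNat (x.toNat + 1))
        = xs ++ [Char.ofNat (x.toNat + 1)] := by
      rw [List.set_append_right _ _ (le_refl _)]; simp
    rw [hget, hlast, hsetz, hsetb, List.dropLast_concat]
    split
    · rfl
    · by_cases hxs : xs = []
      · subst hxs
        rw [pvANextLoop_neg _ _ (by norm_num), pvBNext]
        simp
      · have hlt : (xs.length : Int) - 1 < (xs.length : Int) := by omega
        rw [pvANextLoop_append xs ['a'] _ hlt, ih]

-- ===== VERDICT (by name: the statement is the Claim_ definition above) =====
theorem get_next_option_spec : Claim_equal_get_next_option := by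
  intro s _
  unfold Spec_get_next_option get_next_option get_next_option_alt
  rw [pvANextLoop_eq_pvBNext]
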